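-- pv_equiv track=rewrite | github.com/joshred83/Advent3 | main.py | boxed_cell
-- ===== SOURCE A (Python) =====
-- def boxed_cell(s, idx):
--   s2 = ''
--   tree = False
--   for i, ch in zip(range(len(s)), s):
--     if idx == i:
--       s2 += f"[{ch}]"
--       if ch == '#':
--         tree = True
--
--     else:
--        s2 += f" {ch} "
--   return s2, tree
-- ===== SOURCE B (Python) =====
-- def boxed_cell(s, idx):
--     if 0 <= idx < len(s):
--         before = ''.join(f' {c} ' for c in s[:idx])
--         after = ''.join(f' {c} ' for c in s[idx + 1:])
--         ch = s[idx]
--         return f'{before}[{ch}]{after}', ch == '#'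
--     return ''.join(f' {c} ' for c in s), False
-- ===== Notes on version B (the rewrite author's own statement) =====
-- stated objective: simpler
-- what changed: Replaces the per-character scan with an index-equality branch by a prefix/cell/suffix slice decomposition: join the spaced prefix, bracket the indexed character, join the spaced suffix; out-of-range idx joins the whole string.
import Mathlib
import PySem

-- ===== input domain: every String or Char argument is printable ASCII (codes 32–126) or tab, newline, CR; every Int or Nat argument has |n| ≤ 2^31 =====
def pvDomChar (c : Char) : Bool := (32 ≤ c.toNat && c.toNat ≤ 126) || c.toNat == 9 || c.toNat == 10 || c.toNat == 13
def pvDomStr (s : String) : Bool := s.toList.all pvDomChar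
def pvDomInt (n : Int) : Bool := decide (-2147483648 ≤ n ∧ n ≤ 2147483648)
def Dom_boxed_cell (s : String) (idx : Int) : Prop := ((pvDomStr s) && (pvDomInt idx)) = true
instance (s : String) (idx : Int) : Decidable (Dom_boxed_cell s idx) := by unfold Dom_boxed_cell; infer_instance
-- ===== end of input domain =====

-- B replaces A's per-character scan (index-equality branch inside the loop) by a
-- prefix/cell/suffix slice decomposition; objective: simpler. Both are total.

-- ===== PORT A =====
-- the loop 'for i, ch in zip(range(len(s)), s)' with state (s2, tree); strings are
-- carried as List Char (PySem's representation) and packed with String.ofList at the end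
def boxedGo (idx : Int) : List (Int × Char) → List Char × Bool → List Char × Bool
  | [], acc => acc
  | (i, ch) :: rest, (s2, tree) =>
    if idx == i then
      boxedGo idx rest (s2 ++ ['[', ch, ']'], if ch == '#' then true else tree)
    else
      boxedGo idx rest (s2 ++ [' ', ch, ' '], tree)

def boxed_cell (s : String) (idx : Int) : String × Bool :=
  let r := boxedGo idx (PySem.List.enumerate s.toList 0) ([], false)
  (String.ofList r.1, r.2)

-- ===== PORT B =====
-- ''.join(f' {c} ' for c in cs)
def spacedB (cs : List Char) : List Char := (cs.map (fun c => [' ', c, ' '])).flatten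

def boxed_cell_alt (s : String) (idx : Int) : String × Bool :=
  let cs := s.toList
  if 0 ≤ idx ∧ idx < (cs.length : Int) then
    let n := idx.toNat
    let ch := cs.getD n ' '          -- s[idx], in range by the guard
    (String.ofList (spacedB (cs.take n) ++ '[' :: ch :: ']' :: spacedB (cs.drop (n + 1))),
     ch == '#')
  else
    (String.ofList (spacedB cs), false)

-- ===== PRECONDITION & SPEC =====
def Spec_boxed_cell (s : String) (idx : Int) (out : String × Bool) : Prop := out = boxed_cell_alt s idx
instance (s : String) (idx : Int) (out : String × Bool) : Decidable (Spec_boxed_cell s idx out) := by unfold Spec_boxed_cell; infer_instance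

-- ===== CLAIM (what is proved, stated in full; the proofs are below) =====
def Claim_equal_boxed_cell : Prop := ∀ (s : String) (idx : Int), Dom_boxed_cell s idx → Spec_boxed_cell s idx (boxed_cell s idx)

-- ===== LEMMAS AND PROOFS =====

lemma boxedGo_spec (idx : Int) (cs : List Char) :
    ∀ (i : Int) (s2 : List Char) (tree : Bool),
    boxedGo idx (PySem.List.enumerate cs i) (s2, tree) =
      if 0 ≤ idx - i ∧ idx - i < (cs.length : Int) then
        (s2 ++ spacedB (cs.take (idx - i).toNat) ++
           '[' :: cs.getD (idx - i).toNat ' ' :: ']' :: spacedB (cs.drop ((idx - i).toNat + 1)),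
         tree || (cs.getD (idx - i).toNat ' ' == '#'))
      else (s2 ++ spacedB cs, tree) := by
  induction cs with
  | nil =>
    intro i s2 tree
    simp [PySem.List.enumerate, boxedGo, spacedB]
  | cons c rest ih =>
    intro i s2 tree
    rw [PySem.List.enumerate_cons]
    by_cases h : idx = i
    · subst h
      simp only [boxedGo, beq_self_eq_true, if_true, ih]
      have h1 : ¬ (0 ≤ idx - (idx + 1) ∧ idx - (idx + 1) < ((rest.length : Int))) := by omega
      have h2 : (0 ≤ idx - idx ∧ idx - idx < ((c :: rest).length : Int)) := by
        simp only [List.length_cons]; omega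
      rw [if_neg h1, if_pos h2]
      have h0 : idx - idx = 0 := by omega
      cases hb : (c == '#') <;> simp [spacedB, hb]
    · have hne : (idx == i) = false := by simp [h]
      simp only [boxedGo, hne, Bool.false_eq_true, if_false, ih]
      by_cases h1 : 0 ≤ idx - (i + 1) ∧ idx - (i + 1) < (rest.length : Int)
      · have h2 : 0 ≤ idx - i ∧ idx - i < ((c :: rest).length : Int) := by
          simp; omega
        rw [if_pos h1, if_pos h2]
        have hn : (idx - i).toNat = (idx - (i + 1)).toNat + 1 := by omega
        simp [hn, spacedB]
      · have h2 : ¬ (0 ≤ idx - i ∧ idx - i < ((c :: rest).length : Int)) := by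
          simp only [List.length_cons, not_and, not_lt] at h1 ⊢; omega
        rw [if_neg h1, if_neg h2]
        simp [spacedB]

-- ===== VERDICT (by name: the statement is the Claim_ definition above) =====
theorem boxed_cell_spec : Claim_equal_boxed_cell := by
  intro s idx _
  unfold Spec_boxed_cell boxed_cell boxed_cell_alt
  rw [boxedGo_spec]
  simp only [sub_zero, List.nil_append, Bool.false_or]
  split_ifs with h
  · simp
  · simp
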